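-- pv_equiv track=rewrite | github.com/yeszcx628/vcjiangbing | 练习题/图灵/t8.py | OOOoO
-- ===== SOURCE A (Python) =====
-- def OOOoO(text):
--     """
--     还原自混淆的JavaScript加密函数OOOoO
--     用于生成cookie中的s值
--     """
--     # 分组大小
--     chunk_size = 4
--
--     # 将文本分组
--     def group_message(text, size):
--         chars = list(text)
--         groups = []
--         for i in range(0, len(chars), size):
--             groups.append(chars[i:i+size])
--         return groups
--
--     # 加密每个字符
--     def encrypt_group(group):
--         result = []
--         for char in group:
--             code = ord(char)
--             # 位运算加密
--             code = ((code << 3) | (code >> 5)) & 0xFF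
--             code ^= 0x5A
--             code = ((code << 2) | (code >> 6)) & 0xFF
--             code ^= 0x3F
--             code = code % 256
--             result.append(chr(code))
--         return result
--
--     # 合并加密后的组
--     def merge_groups(groups):
--         return ''.join([''.join(group) for group in groups])
--
--     # 转为十六进制
--     def to_hex_string(text):
--         return ''.join([format(ord(c), '02x') for c in text])
--
--     # 执行加密流程
--     groups = group_message(text, chunk_size)
--     encrypted_groups = [encrypt_group(group) for group in groups]
--     merged = merge_groups(encrypted_groups)
--     hex_result = to_hex_string(merged)
--
--     return hex_result
-- ===== SOURCE B (Python) =====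
-- def OOOoO(text):
--     # One-pass memo table: the bit-op transform + hex is computed once per
--     # DISTINCT character, then the output is a single join of table lookups.
--     table = {}
--     for c in text:
--         if c not in table:
--             code = ord(c)
--             code = ((code << 3) | (code >> 5)) & 0xFF
--             code ^= 0x5A
--             code = ((code << 2) | (code >> 6)) & 0xFF
--             code ^= 0x3F
--             table[c] = format(code % 256, '02x')
--     return ''.join(table[c] for c in text)
-- ===== Notes on version B (the rewrite author's own statement) =====
-- stated objective: faster
-- what changed: Replaced the chunk/group/encrypt/merge/hex pipeline by a single memo table keyed by distinct characters (the full bit-op transform and hex formatting run once per distinct char) followed by one join of table lookups; the grouping scaffolding is gone.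
import Mathlib
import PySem

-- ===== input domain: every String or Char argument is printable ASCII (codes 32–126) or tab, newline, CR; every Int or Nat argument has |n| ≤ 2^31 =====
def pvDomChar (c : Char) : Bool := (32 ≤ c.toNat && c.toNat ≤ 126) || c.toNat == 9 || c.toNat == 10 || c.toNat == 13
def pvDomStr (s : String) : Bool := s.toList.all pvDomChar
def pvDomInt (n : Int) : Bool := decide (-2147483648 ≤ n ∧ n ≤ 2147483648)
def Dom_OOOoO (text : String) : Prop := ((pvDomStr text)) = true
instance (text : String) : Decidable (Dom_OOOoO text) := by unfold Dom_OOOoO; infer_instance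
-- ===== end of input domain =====

-- B replaces A's chunk/group/encrypt/merge/hex pipeline by a memo table keyed by
-- distinct characters plus one join of lookups (measured constant-factor speedup).

-- ===== PORT A =====

-- the per-character bit-op transform (identical lines appear in both Pythons)
def pvEnc (code0 : Nat) : Nat :=
  let code1 := ((code0 <<< 3) ||| (code0 >>> 5)) &&& 0xFF
  let code2 := code1 ^^^ 0x5A
  let code3 := ((code2 <<< 2) ||| (code2 >>> 6)) &&& 0xFF
  let code4 := code3 ^^^ 0x3F
  code4 % 256

-- format(n, '02x') for 0 ≤ n ≤ 255: exactly two lowercase hex digits (exact on that range)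
def pvHexDigit (d : Nat) : Char := if d < 10 then Char.ofNat (48 + d) else Char.ofNat (87 + d)
def pvHexPair (n : Nat) : List Char := [pvHexDigit (n / 16), pvHexDigit (n % 16)]

-- group_message: for i in range(0, len(chars), size): groups.append(chars[i:i+size])
def pvGroupMessage (chars : List Char) (size : Int) : List (List Char) :=
  (PySem.List.pyRange 0 chars.length size).foldl
    (fun gs i => gs ++ [PySem.List.slice chars (some i) (some (i + size))]) []

-- encrypt_group: per-char transform, chr, appended to result
def pvEncryptGroup (group : List Char) : List Char :=
  group.foldl (fun r ch => r ++ [Char.ofNat (pvEnc ch.toNat)]) []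

-- merge_groups: ''.join([''.join(group) for group in groups])  (join with "" = flatten, exact)
def pvMergeGroups (groups : List (List Char)) : List Char :=
  (groups.map (fun g => g)).flatten

-- to_hex_string: ''.join([format(ord(c), '02x') for c in text])
def pvToHexString (chars : List Char) : List Char :=
  (chars.map (fun c => pvHexPair c.toNat)).flatten

def OOOoO (text : String) : String :=
  let chars := text.toList
  let groups := pvGroupMessage chars 4
  let encryptedGroups := groups.map pvEncryptGroup
  let merged := pvMergeGroups encryptedGroups
  String.ofList (pvToHexString merged)

-- ===== PORT B =====

-- value stored in the memo table for character c (the same transform + format lines)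
def pvTabVal (c : Char) : String := String.ofList (pvHexPair (pvEnc c.toNat))

-- the build loop: if c not in table: table[c] = format(code % 256, '02x')
def pvBuildTable (chars : List Char) : PySem.Dict Char String :=
  chars.foldl (fun d c => if d.contains c then d else d.insert c (pvTabVal c)) PySem.Dict.empty

def OOOoO_alt (text : String) : String :=
  let table := pvBuildTable text.toList
  -- ''.join(table[c] for c in text); every c of text is a key, so getD's default is never used
  String.ofList ((text.toList.map (fun c => (table.getD c "").toList)).flatten)

-- ===== PRECONDITION & SPEC =====
def Spec_OOOoO (text : String) (out : String) : Prop := out = OOOoO_alt text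
instance (text : String) (out : String) : Decidable (Spec_OOOoO text out) := by unfold Spec_OOOoO; infer_instance

-- ===== CLAIM (what is proved, stated in full; the proofs are below) =====
def Claim_equal_OOOoO : Prop := ∀ (text : String), Dom_OOOoO text → Spec_OOOoO text (OOOoO text)

-- ===== LEMMAS AND PROOFS =====

theorem pvEnc_lt (n : Nat) : pvEnc n < 256 := by
  unfold pvEnc; exact Nat.mod_lt _ (by norm_num)

theorem toNat_ofNat_enc (n : Nat) : (Char.ofNat (pvEnc n)).toNat = pvEnc n := by
  rw [Char.toNat_ofNat]
  have := pvEnc_lt n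
  simp only [Nat.isValidChar]
  rw [if_pos]; left; omega

theorem pyRange4_nil (a b : Int) (h : b ≤ a) : PySem.List.pyRange a b 4 = [] := by
  rw [PySem.List.pyRange_of_pos _ _ (by norm_num : (0:Int) < 4)]
  rw [if_neg (by omega)]; simp

theorem pyRange4_cons (a b : Int) (h : a < b) :
    PySem.List.pyRange a b 4 = a :: PySem.List.pyRange (a + 4) b 4 := by
  rw [PySem.List.pyRange_of_pos _ _ (by norm_num : (0:Int) < 4),
      PySem.List.pyRange_of_pos _ _ (by norm_num : (0:Int) < 4)]
  rw [if_pos h]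
  have hcount : ((b - a + 4 - 1) / 4).toNat
      = (if a + 4 < b then ((b - (a + 4) + 4 - 1) / 4).toNat else 0) + 1 := by
    split_ifs with h2 <;> omega
  rw [hcount, List.range_succ_eq_map, List.map_cons, List.map_map]
  refine congrArg₂ _ (by ring) (List.map_congr_left ?_)
  intro k _
  simp only [Function.comp]
  push_cast
  ring

theorem group_flatten_aux (chars : List Char) :
    ∀ (m k : Nat) (acc : List (List Char)), chars.length - k ≤ m →
      (((PySem.List.pyRange (k : Int) (chars.length : Int) 4).foldl
          (fun gs i => gs ++ [PySem.List.slice chars (some i) (some (i + 4))]) acc).flatten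
        = acc.flatten ++ chars.drop k) := by
  intro m
  induction m with
  | zero =>
      intro k acc h
      have hk : chars.length ≤ k := by omega
      rw [pyRange4_nil _ _ (by exact_mod_cast hk)]
      simp [List.drop_eq_nil_of_le (by omega)]
  | succ m ih =>
      intro k acc h
      by_cases hk : k < chars.length
      · rw [pyRange4_cons _ _ (by exact_mod_cast hk), List.foldl_cons]
        have h4 : ((k : Int) + 4) = ((k + 4 : Nat) : Int) := by push_cast; ring
        rw [h4]
        rw [ih (k + 4) _ (by omega)]
        have hsl : PySem.List.slice chars (some (k : Int)) (some ((k + 4 : Nat) : Int))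
            = (chars.drop k).take 4 := by
          rw [PySem.List.slice_natCast]
          congr 1; omega
        rw [hsl]
        simp only [List.flatten_append, List.flatten_cons, List.flatten_nil, List.append_nil,
          List.append_assoc]
        congr 1
        rw [show k + 4 = k + 4 from rfl, ← List.drop_drop, List.take_append_drop]
      · rw [pyRange4_nil _ _ (by exact_mod_cast Nat.le_of_not_lt hk)]
        simp [List.drop_eq_nil_of_le (Nat.le_of_not_lt hk)]

theorem group_flatten (chars : List Char) :
    (pvGroupMessage chars 4).flatten = chars := by
  unfold pvGroupMessage
  have := group_flatten_aux chars chars.length 0 [] (by omega)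
  simpa using this

theorem encryptGroup_eq_map (g : List Char) :
    pvEncryptGroup g = g.map (fun c => Char.ofNat (pvEnc c.toNat)) := by
  unfold pvEncryptGroup
  suffices h : ∀ (l : List Char) (acc : List Char),
      l.foldl (fun r ch => r ++ [Char.ofNat (pvEnc ch.toNat)]) acc
        = acc ++ l.map (fun c => Char.ofNat (pvEnc c.toNat)) by
    simpa using h g []
  intro l
  induction l with
  | nil => simp
  | cons a t ih => intro acc; simp [ih]

-- A's output characterised: per-char transform + hex, mapped over the text
theorem OOOoO_char (text : String) :
    OOOoO text = String.ofList ((text.toList.map (fun c => pvHexPair (pvEnc c.toNat))).flatten) := by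
  unfold OOOoO pvMergeGroups pvToHexString
  simp only [List.map_id']
  rw [show (pvGroupMessage text.toList 4).map pvEncryptGroup
        = (pvGroupMessage text.toList 4).map (List.map (fun c => Char.ofNat (pvEnc c.toNat)))
      from List.map_congr_left (fun g _ => encryptGroup_eq_map g)]
  rw [← List.map_flatten, group_flatten]
  simp only [List.map_map]
  congr 1
  congr 1
  apply List.map_congr_left
  intro c _
  simp only [Function.comp]
  rw [toNat_ofNat_enc]

-- the memo table returns pvTabVal c for every c encountered
theorem buildTable_get (l : List Char) (d : PySem.Dict Char String)
    (hd : ∀ k, d.contains k = true → d.get? k = some (pvTabVal k)) (c : Char) :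
    (l.foldl (fun d c => if d.contains c then d else d.insert c (pvTabVal c)) d).get? c
      = if c ∈ l ∨ d.contains c = true then some (pvTabVal c) else d.get? c := by
  induction l generalizing d with
  | nil =>
      simp only [List.foldl_nil, List.not_mem_nil, false_or]
      split_ifs with h
      · exact hd c h
      · rfl
  | cons a t ih =>
      rw [List.foldl_cons]
      have hd' : ∀ k, (if d.contains a then d else d.insert a (pvTabVal a)).contains k = true →
          (if d.contains a then d else d.insert a (pvTabVal a)).get? k = some (pvTabVal k) := by
        intro k
        split_ifs with ha
        · exact hd k
        · rw [PySem.Dict.contains_insert, PySem.Dict.get?_insert]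
          intro hk
          by_cases hka : k = a
          · simp [hka]
          · simp only [if_neg hka]
            apply hd
            simpa [hka] using hk
      rw [ih _ hd']
      by_cases hmt : c ∈ t
      · simp [hmt]
      · by_cases hca : c = a
        · subst hca
          split_ifs with hc ha hb <;>
            simp_all [PySem.Dict.contains_insert, PySem.Dict.get?_insert]
        · have hcont : (if d.contains a then d else d.insert a (pvTabVal a)).contains c
              = d.contains c := by
            split_ifs with ha
            · rfl
            · rw [PySem.Dict.contains_insert]; simp [hca]
          have hget : (if d.contains a then d else d.insert a (pvTabVal a)).get? c
              = d.get? c := by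
            split_ifs with ha
            · rfl
            · rw [PySem.Dict.get?_insert, if_neg hca]
          rw [hcont, hget]
          simp [hmt, hca, List.mem_cons]

theorem buildTable_getD (chars : List Char) (c : Char) (hc : c ∈ chars) :
    (pvBuildTable chars).getD c "" = pvTabVal c := by
  unfold pvBuildTable
  rw [PySem.Dict.getD_eq_get?_getD,
      buildTable_get chars PySem.Dict.empty (by simp [PySem.Dict.contains_empty]) c,
      if_pos (Or.inl hc)]
  rfl

-- ===== VERDICT (by name: the statement is the Claim_ definition above) =====
theorem OOOoO_spec : Claim_equal_OOOoO := by
  intro text _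
  unfold Spec_OOOoO
  rw [OOOoO_char]
  unfold OOOoO_alt
  congr 1
  congr 1
  apply List.map_congr_left
  intro c hc
  rw [buildTable_getD _ _ hc]
  unfold pvTabVal
  simp
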